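-- pv_equiv track=rewrite | github.com/instrat-pl/pypsa-pl | src/pypsa_pl/plot_results.py | determine_label_locations
-- ===== SOURCE A (Python) =====
-- def determine_label_locations(values, small_value, n_locs=5, mirror=False):
--     mid_loc = n_locs // 2
--     locs = [mid_loc] * len(values)
--     for i in range(len(locs)):
--         if abs(values[i]) < small_value:
--             if i == 0 or abs(values[i - 1]) >= small_value:
--                 locs[i] = 0
--             else:
--                 new_loc = (locs[i - 1] + 1) % n_locs
--                 if new_loc == mid_loc:
--                     new_loc = (new_loc + 1) % n_locs
--                 locs[i] = new_loc
--     locs = [loc - mid_loc for loc in locs]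
--     if mirror:
--         locs = [-loc for loc in locs]
--     return locs
-- ===== SOURCE B (Python) =====
-- def determine_label_locations(values, small_value, n_locs=5, mirror=False):
--     # One forward pass with a run counter: the k-th consecutive small value (k = 0, 1, ...)
--     # gets location k % (n_locs-1) shifted past the middle slot, in closed form.
--     mid_loc = n_locs // 2
--     sign = -1 if mirror else 1
--     out = []
--     j = -1
--     for v in values:
--         if abs(v) < small_value:
--             j += 1
--             if n_locs > 1:
--                 r = j % (n_locs - 1)
--                 loc = r if r < mid_loc else r + 1
--             else:
--                 loc = mid_loc
--             out.append(sign * (loc - mid_loc))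
--         else:
--             j = -1
--             out.append(0)
--     return out
-- ===== Notes on version B (the rewrite author's own statement) =====
-- stated objective: simpler
-- what changed: B replaces A's three passes (a pre-filled mutable locs array, an index loop that re-reads values[i-1] and locs[i-1] and steps the previous slot with a conditional skip over the middle slot, then two rescaling map passes) by one forward pass keeping only a run counter j of consecutive small values, computing each slot in closed form as j % (n_locs-1) shifted past the middle slot and emitting the final rescaled offset directly; …
-- outside the precondition, e.g. on determine_label_locations([0], 1, -5, False): A returns [3], B returns [0]; on determine_label_locations([0], 1, 0, False): A returns [0], B returns [0]
import Mathlib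
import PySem

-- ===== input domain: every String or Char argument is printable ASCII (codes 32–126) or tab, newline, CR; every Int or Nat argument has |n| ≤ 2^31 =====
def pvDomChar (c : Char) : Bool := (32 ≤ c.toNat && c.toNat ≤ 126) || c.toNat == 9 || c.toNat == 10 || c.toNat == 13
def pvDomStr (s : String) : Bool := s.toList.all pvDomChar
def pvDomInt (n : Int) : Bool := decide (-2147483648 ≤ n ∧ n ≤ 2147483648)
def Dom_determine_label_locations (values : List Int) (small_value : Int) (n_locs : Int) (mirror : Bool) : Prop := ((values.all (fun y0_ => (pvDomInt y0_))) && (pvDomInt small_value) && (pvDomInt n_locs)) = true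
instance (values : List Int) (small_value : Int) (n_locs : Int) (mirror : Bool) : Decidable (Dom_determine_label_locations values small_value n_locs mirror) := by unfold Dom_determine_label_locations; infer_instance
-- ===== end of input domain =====

-- B replaces A's mutable-array stepping loop plus two rescaling passes by one forward pass with a
-- run counter and a closed-form slot (objective: simpler; same O(n) cost).

-- ===== PORT A =====
-- values[i], values[i-1], locs[i-1] are always in range for the reached branches (i ranges over
-- range(len(locs)), i ≥ 1 in the else branch), so .getD _ 0 is exact there.
def determine_label_locations (values : List Int) (small_value : Int) (n_locs : Int) (mirror : Bool) : List Int :=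
  let mid_loc := PySem.Int.floordiv n_locs 2
  let locs0 := List.replicate values.length mid_loc
  let locs1 := (List.range values.length).foldl (fun (locs : List Int) (i : Nat) =>
      if |values.getD i 0| < small_value then
        if i = 0 ∨ |values.getD (i - 1) 0| ≥ small_value then
          locs.set i 0
        else
          let new_loc := PySem.Int.mod (locs.getD (i - 1) 0 + 1) n_locs
          let new_loc := if new_loc = mid_loc then PySem.Int.mod (new_loc + 1) n_locs else new_loc
          locs.set i new_loc
      else locs) locs0
  let locs2 := locs1.map (fun loc => loc - mid_loc)
  if mirror then locs2.map (fun loc => -loc) else locs2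

-- ===== PORT B =====
def determine_label_locations_alt (values : List Int) (small_value : Int) (n_locs : Int) (mirror : Bool) : List Int :=
  let mid_loc := PySem.Int.floordiv n_locs 2
  let sign : Int := if mirror then -1 else 1
  (values.foldl (fun (st : List Int × Int) (v : Int) =>
      if |v| < small_value then
        let j := st.2 + 1
        let loc := if 1 < n_locs then
            (let r := PySem.Int.mod j (n_locs - 1); if r < mid_loc then r else r + 1)
          else mid_loc
        (st.1 ++ [sign * (loc - mid_loc)], j)
      else (st.1 ++ [(0 : Int)], -1)) ([], -1)).1

-- ===== PRECONDITION & SPEC =====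
-- Pre_ restricts n_locs to the natural domain of a location count, n_locs ≥ 1: for n_locs = 0
-- A raises ZeroDivisionError on two consecutive small values (and returns only accidentally when
-- no such pair occurs), and for n_locs < 0 a negative number of label slots is meaningless
-- (A returns accidental floor-mod values there).
def Pre_determine_label_locations (values : List Int) (small_value : Int) (n_locs : Int) (mirror : Bool) : Prop :=
  1 ≤ n_locs
instance (values : List Int) (small_value : Int) (n_locs : Int) (mirror : Bool) : Decidable (Pre_determine_label_locations values small_value n_locs mirror) := by unfold Pre_determine_label_locations; infer_instance

def pvWitness_determine_label_locations : List Int × Int × Int × Bool := ([1, 0, 0, 4, 0, 0, 0], 2, 5, false)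

def Spec_determine_label_locations (values : List Int) (small_value : Int) (n_locs : Int) (mirror : Bool) (out : List Int) : Prop := out = determine_label_locations_alt values small_value n_locs mirror
instance (values : List Int) (small_value : Int) (n_locs : Int) (mirror : Bool) (out : List Int) : Decidable (Spec_determine_label_locations values small_value n_locs mirror out) := by unfold Spec_determine_label_locations; infer_instance

-- ===== CLAIM (what is proved, stated in full; the proofs are below) =====
def Claim_equal_determine_label_locations : Prop := ∀ (values : List Int) (small_value : Int) (n_locs : Int) (mirror : Bool), Dom_determine_label_locations values small_value n_locs mirror → Pre_determine_label_locations values small_value n_locs mirror → Spec_determine_label_locations values small_value n_locs mirror (determine_label_locations values small_value n_locs mirror)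

-- ===== LEMMAS AND PROOFS =====

theorem pvGetD_append_cons (xs ys : List Int) (y : Int) : (xs ++ y :: ys).getD xs.length 0 = y := by
  induction xs with
  | nil => simp
  | cons a t ih => simpa using ih

theorem pvSet_append_cons (xs ys : List Int) (y z : Int) : (xs ++ y :: ys).set xs.length z = xs ++ z :: ys := by
  induction xs with
  | nil => simp
  | cons a t ih => simpa using ih

/-- A's stepping of the previous location inside a run of small values. -/
def astep (n_locs mid p : Int) : Int :=
  let new_loc := PySem.Int.mod (p + 1) n_locs
  if new_loc = mid then PySem.Int.mod (new_loc + 1) n_locs else new_loc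

/-- B's closed-form location for the j-th element of a run of small values. -/
def bloc (n_locs mid j : Int) : Int :=
  if 1 < n_locs then
    (let r := PySem.Int.mod j (n_locs - 1); if r < mid then r else r + 1)
  else mid

/-- Structural recursion computing A's raw (pre-rescaling) locations; the state is the previous
location when the previous value was small, `none` otherwise. -/
def arec (small n_locs mid : Int) : List Int → Option Int → List Int
  | [], _ => []
  | v :: vs, prev =>
    if |v| < small then
      let loc := match prev with | none => 0 | some p => astep n_locs mid p
      loc :: arec small n_locs mid vs (some loc)
    else
      mid :: arec small n_locs mid vs none

/-- Structural recursion computing B's output; the state is the run counter. -/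
def brec (small n_locs mid sign : Int) : List Int → Int → List Int
  | [], _ => []
  | v :: vs, j =>
    if |v| < small then
      sign * (bloc n_locs mid (j + 1) - mid) :: brec small n_locs mid sign vs (j + 1)
    else
      (0 : Int) :: brec small n_locs mid sign vs (-1)

/-- Invariant tying A's fold state to `arec`'s state. -/
def AInv (small : Int) (done locsd : List Int) : Option Int → Prop
  | none => done = [] ∨ ∃ d' l, done = d' ++ [l] ∧ |l| ≥ small
  | some p => ∃ d' l ld', done = d' ++ [l] ∧ |l| < small ∧ locsd = ld' ++ [p]

theorem A_loop (small n_locs mid : Int) :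
    ∀ (rest done locsd : List Int) (prev : Option Int),
      locsd.length = done.length → AInv small done locsd prev →
      (List.range' done.length rest.length).foldl
        (fun (locs : List Int) (i : Nat) =>
          if |(done ++ rest).getD i 0| < small then
            if i = 0 ∨ |(done ++ rest).getD (i - 1) 0| ≥ small then
              locs.set i 0
            else
              let new_loc := PySem.Int.mod (locs.getD (i - 1) 0 + 1) n_locs
              let new_loc := if new_loc = mid then PySem.Int.mod (new_loc + 1) n_locs else new_loc
              locs.set i new_loc
          else locs)
        (locsd ++ List.replicate rest.length mid)
      = locsd ++ arec small n_locs mid rest prev := by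
  intro rest
  induction rest with
  | nil => intro done locsd prev _ _; simp [arec]
  | cons v vs ih =>
    intro done locsd prev hlen hinv
    have hv : (done ++ v :: vs).getD done.length 0 = v := pvGetD_append_cons done vs v
    simp only [List.length_cons, List.range'_succ, List.foldl_cons, List.replicate_succ]
    by_cases hsm : |v| < small
    · cases prev with
      | none =>
        have hcond : done.length = 0 ∨ |(done ++ v :: vs).getD (done.length - 1) 0| ≥ small := by
          rcases hinv with h | ⟨d', l, hd, hl⟩
          · left; simp [h]
          · right
            subst hd
            have hh : (d' ++ [l] ++ v :: vs).getD ((d' ++ [l]).length - 1) 0 = l := by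
              simpa [List.append_assoc] using pvGetD_append_cons d' (v :: vs) l
            rw [hh]; exact hl
        have hset : (locsd ++ mid :: List.replicate vs.length mid).set done.length 0
            = locsd ++ (0 : Int) :: List.replicate vs.length mid := by
          rw [← hlen]; exact pvSet_append_cons _ _ _ _
        have h2 := ih (done ++ [v]) (locsd ++ [(0 : Int)]) (some 0)
          (by simp [hlen]) ⟨done, v, locsd, rfl, hsm, rfl⟩
        simp only [List.append_assoc, List.singleton_append, List.length_append,
          List.length_cons, List.length_nil, Nat.zero_add] at h2
        rw [hv, if_pos hsm, if_pos hcond, hset, h2]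
        simp [arec, hsm]
      | some p =>
        obtain ⟨d', l, ld', hd, hl, hld⟩ := hinv
        have hne : ¬ (done.length = 0 ∨ |(done ++ v :: vs).getD (done.length - 1) 0| ≥ small) := by
          subst hd
          have hh : (d' ++ [l] ++ v :: vs).getD ((d' ++ [l]).length - 1) 0 = l := by
            simpa [List.append_assoc] using pvGetD_append_cons d' (v :: vs) l
          rw [hh]
          simp only [List.length_append, List.length_cons, List.length_nil]
          push_neg
          exact ⟨by omega, by omega⟩
        have hget : (locsd ++ mid :: List.replicate vs.length mid).getD (done.length - 1) 0 = p := by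
          subst hld
          have he : done.length - 1 = ld'.length := by
            subst hd; simp at hlen ⊢; omega
          rw [he]
          simpa [List.append_assoc] using
            pvGetD_append_cons ld' (mid :: List.replicate vs.length mid) p
        have hset : (locsd ++ mid :: List.replicate vs.length mid).set done.length
            (if PySem.Int.mod (p + 1) n_locs = mid
              then PySem.Int.mod (PySem.Int.mod (p + 1) n_locs + 1) n_locs
              else PySem.Int.mod (p + 1) n_locs)
            = locsd ++ (astep n_locs mid p) :: List.replicate vs.length mid := by
          rw [← hlen]; exact pvSet_append_cons _ _ _ _
        have h2 := ih (done ++ [v]) (locsd ++ [astep n_locs mid p]) (some (astep n_locs mid p))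
          (by simp [hlen]) ⟨done, v, locsd, rfl, hsm, rfl⟩
        simp only [List.append_assoc, List.singleton_append, List.length_append,
          List.length_cons, List.length_nil, Nat.zero_add] at h2
        rw [hv, if_pos hsm, if_neg hne, hget, hset, h2]
        simp [arec, hsm]
    · have h2 := ih (done ++ [v]) (locsd ++ [mid]) none
        (by simp [hlen]) (Or.inr ⟨done, v, rfl, not_lt.mp hsm⟩)
      simp only [List.append_assoc, List.singleton_append, List.length_append,
        List.length_cons, List.length_nil, Nat.zero_add] at h2
      rw [hv, if_neg hsm, h2]
      simp [arec, hsm]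

theorem A_eq (values : List Int) (small n_locs : Int) (mirror : Bool) :
    determine_label_locations values small n_locs mirror
      = (arec small n_locs (PySem.Int.floordiv n_locs 2) values none).map
          (fun l => (if mirror then (-1 : Int) else 1) * (l - PySem.Int.floordiv n_locs 2)) := by
  simp only [determine_label_locations, List.range_eq_range']
  have h := A_loop small n_locs (PySem.Int.floordiv n_locs 2) values [] [] none rfl (Or.inl rfl)
  simp only [List.nil_append, List.length_nil] at h
  rw [h]
  cases mirror <;> simp [List.map_map, Function.comp, neg_one_mul]

theorem B_fold (small n_locs mid sign : Int) :
    ∀ (vs acc : List Int) (j : Int),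
      (vs.foldl (fun (st : List Int × Int) (v : Int) =>
          if |v| < small then
            let j := st.2 + 1
            let loc := if 1 < n_locs then
                (let r := PySem.Int.mod j (n_locs - 1); if r < mid then r else r + 1)
              else mid
            (st.1 ++ [sign * (loc - mid)], j)
          else (st.1 ++ [(0 : Int)], -1)) (acc, j)).1
      = acc ++ brec small n_locs mid sign vs j := by
  intro vs
  induction vs with
  | nil => intro acc j; simp [brec]
  | cons v t ih =>
    intro acc j
    simp only [List.foldl_cons]
    by_cases h : |v| < small
    · rw [if_pos h]
      rw [ih]
      simp [brec, bloc, h, List.append_assoc]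
    · rw [if_neg h]
      rw [ih]
      simp [brec, h, List.append_assoc]

theorem B_eq (values : List Int) (small n_locs : Int) (mirror : Bool) :
    determine_label_locations_alt values small n_locs mirror
      = brec small n_locs (PySem.Int.floordiv n_locs 2) (if mirror then (-1 : Int) else 1) values (-1) := by
  unfold determine_label_locations_alt
  rw [B_fold small n_locs (PySem.Int.floordiv n_locs 2) (if mirror then (-1 : Int) else 1) values [] (-1)]
  simp

theorem key_zero (n : Int) (hn : 1 ≤ n) : bloc n (PySem.Int.floordiv n 2) 0 = 0 := by
  have hfd : PySem.Int.floordiv n 2 = n / 2 := PySem.Int.floordiv_eq_ediv_of_pos (by omega)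
  unfold bloc
  rw [hfd]
  by_cases h : (1 : Int) < n
  · rw [if_pos h, PySem.Int.mod_eq_emod_of_pos (by omega)]
    have h0 : (0 : Int) % (n - 1) = 0 := Int.zero_emod _
    rw [h0]
    have : (0 : Int) < n / 2 := by omega
    simp [this]
  · rw [if_neg h]; omega

theorem key_step (n j : Int) (hn : 1 ≤ n) (hj : 0 ≤ j) :
    astep n (PySem.Int.floordiv n 2) (bloc n (PySem.Int.floordiv n 2) j)
      = bloc n (PySem.Int.floordiv n 2) (j + 1) := by
  have hfd : PySem.Int.floordiv n 2 = n / 2 := PySem.Int.floordiv_eq_ediv_of_pos (by omega)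
  by_cases h2 : (1 : Int) < n
  · have hL : (0 : Int) < n - 1 := by omega
    have hme : ∀ a : Int, PySem.Int.mod a (n - 1) = a % (n - 1) := fun a =>
      PySem.Int.mod_eq_emod_of_pos hL
    have hmn : ∀ a : Int, PySem.Int.mod a n = a % n := fun a =>
      PySem.Int.mod_eq_emod_of_pos (by omega)
    have hr0 : 0 ≤ j % (n - 1) := Int.emod_nonneg j (by omega)
    have hr1 : j % (n - 1) < n - 1 := Int.emod_lt_of_pos j hL
    have hmid1 : 1 ≤ n / 2 := by omega
    have hmid2 : 2 * (n / 2) ≤ n ∧ n ≤ 2 * (n / 2) + 1 := by omega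
    have hsucc : (j + 1) % (n - 1) = if j % (n - 1) = n - 2 then 0 else j % (n - 1) + 1 := by
      have hdm : (n - 1) * (j / (n - 1)) + j % (n - 1) = j := Int.ediv_add_emod j (n - 1)
      have key : (j + 1) % (n - 1) = (j % (n - 1) + 1) % (n - 1) := by
        conv_lhs => rw [show j + 1 = (j % (n - 1) + 1) + (n - 1) * (j / (n - 1)) by linarith [hdm]]
        rw [Int.add_mul_emod_self_left]
      rw [key]
      by_cases hc : j % (n - 1) = n - 2
      · rw [if_pos hc, hc, show n - 2 + 1 = n - 1 by ring, Int.emod_self]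
      · rw [if_neg hc]; exact Int.emod_eq_of_lt (by omega) (by omega)
    unfold astep bloc
    rw [hfd]
    rw [if_pos h2, if_pos h2]
    simp only [hme, hmn, hsucc]
    by_cases hrm : j % (n - 1) < n / 2
    · rw [if_pos hrm]
      have hp1 : (j % (n - 1) + 1) % n = j % (n - 1) + 1 := Int.emod_eq_of_lt (by omega) (by omega)
      rw [hp1]
      by_cases hq : j % (n - 1) + 1 = n / 2
      · rw [if_pos hq, hq]
        have hp2 : (n / 2 + 1) % n = if n / 2 + 1 = n then 0 else n / 2 + 1 := by
          by_cases hx : n / 2 + 1 = n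
          · rw [if_pos hx, hx, Int.emod_self]
          · rw [if_neg hx]; exact Int.emod_eq_of_lt (by omega) (by omega)
        rw [hp2]
        split_ifs <;> omega
      · rw [if_neg hq]
        split_ifs <;> omega
    · rw [if_neg hrm]
      have hp1 : (j % (n - 1) + 1 + 1) % n = if j % (n - 1) = n - 2 then 0 else j % (n - 1) + 2 := by
        by_cases hx : j % (n - 1) = n - 2
        · rw [if_pos hx, show j % (n - 1) + 1 + 1 = n by omega, Int.emod_self]
        · rw [if_neg hx, show j % (n - 1) + 1 + 1 = j % (n - 1) + 2 by ring]
          exact Int.emod_eq_of_lt (by omega) (by omega)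
      rw [hp1]
      by_cases hx : j % (n - 1) = n - 2
      · rw [if_pos hx] at *
        have hne : ¬ ((0 : Int) = n / 2) := by omega
        rw [if_neg hne]
        split_ifs <;> omega
      · rw [if_neg hx] at *
        have hne : ¬ (j % (n - 1) + 2 = n / 2) := by omega
        rw [if_neg hne]
        split_ifs <;> omega
  · have hn1 : n = 1 := by omega
    subst hn1
    simp [astep, bloc, PySem.Int.mod, PySem.Int.floordiv]

theorem AB (small n_locs sign : Int) (hn : 1 ≤ n_locs) :
    ∀ (vs : List Int) (prev : Option Int) (j : Int),
      (match prev with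
       | none => j = -1
       | some p => 0 ≤ j ∧ p = bloc n_locs (PySem.Int.floordiv n_locs 2) j) →
      (arec small n_locs (PySem.Int.floordiv n_locs 2) vs prev).map
          (fun l => sign * (l - PySem.Int.floordiv n_locs 2))
        = brec small n_locs (PySem.Int.floordiv n_locs 2) sign vs j := by
  intro vs
  induction vs with
  | nil => intro prev j _; simp [arec, brec]
  | cons v t ih =>
    intro prev j hrel
    by_cases h : |v| < small
    · cases prev with
      | none =>
        have hj : j = -1 := hrel
        subst hj
        simp only [arec, brec, if_pos h]
        rw [show (-1 : Int) + 1 = 0 by ring, key_zero n_locs hn]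
        simp only [List.map_cons]
        rw [ih (some 0) 0 ⟨le_refl 0, (key_zero n_locs hn).symm⟩]
      | some p =>
        obtain ⟨hj0, hp⟩ := hrel
        simp only [arec, brec, if_pos h]
        rw [hp, key_step n_locs j hn hj0]
        simp only [List.map_cons]
        rw [ih (some (bloc n_locs (PySem.Int.floordiv n_locs 2) (j + 1))) (j + 1) ⟨by omega, rfl⟩]
    · simp only [arec, brec, if_neg h, List.map_cons]
      rw [ih none (-1) rfl]
      simp

-- ===== VERDICT (by name: the statement is the Claim_ definition above) =====
theorem determine_label_locations_spec : Claim_equal_determine_label_locations := by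
  intro values small_value n_locs mirror _ hpre
  unfold Spec_determine_label_locations
  rw [A_eq, B_eq]
  exact AB small_value n_locs (if mirror then (-1 : Int) else 1) hpre values none (-1) rfl
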